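-- pv_equiv track=rewrite | github.com/gduarter/old_phd_projects | parameter-sampling/sample_parameters.py | params_in_mols
-- ===== SOURCE A (Python) =====
-- def param_in_mols(labels, smirks):
--     """Return list of True/False values as to whether specified SMIRKS pattern is in the molecules
--     for which labels are provided. Labels should be as output by ForceField.labelMolecules"""
--     smirks_in_mol = []
--     for mol_entry in range(len(labels)):
--         found = False
--         for force in labels[mol_entry].keys():
--             for (atom_indices, pid, s) in labels[mol_entry][force]:
--                 if s==smirks and not found:
--                     smirks_in_mol.append(True)
--                     found = True
--         if not found:
--             smirks_in_mol.append(False)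
--     return smirks_in_mol
--
-- def params_in_mols( labels, tuplelist ):
--     """Return list of True/False values as to whether any of the specified SMIRKS patterns are in each of the specified molecules. Arguments are labels, as output by ForceField.labelMolecules, and smirkslist, list of SMIRKS of interest."""
--     smirkslist = [tuplelist[i][1] for i in range(len(tuplelist))]
--     params_is_in_mols = []
--     i = 0
--     for smirks in smirkslist:
--         # Handle case where this is the first smirks
--         if len(params_is_in_mols)==0:
--             params_is_in_mols = param_in_mols(labels, smirks)
--         # If this is a subsequent smirks, just update where needed
--         else:
--             tmp = param_in_mols(labels, smirks)
--             # Make updates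
--             for idx in range(len(tmp)):
--                 if tmp[idx]:
--                     params_is_in_mols[idx] = True
--     return params_is_in_mols
-- ===== SOURCE B (Python) =====
-- def params_in_mols(labels, tuplelist):
--     """One pass over molecules: collect each molecule's SMIRKS into a set and
--     intersect with the wanted-pattern set (A returns [] for an empty tuplelist)."""
--     if not tuplelist:
--         return []
--     wanted = {t[1] for t in tuplelist}
--     result = []
--     for mol in labels:
--         present = {s for force in mol for (_atoms, _pid, s) in mol[force]}
--         result.append(bool(present & wanted))
--     return result
-- ===== Notes on version B (the rewrite author's own statement) =====
-- stated objective: faster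
-- what changed: B makes a single pass over the molecules, building the wanted-pattern set once and each molecule's present-SMIRKS set once and testing set intersection, replacing A's per-pattern helper that rescans every molecule plus A's in-place OR-update loop.
import Mathlib
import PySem

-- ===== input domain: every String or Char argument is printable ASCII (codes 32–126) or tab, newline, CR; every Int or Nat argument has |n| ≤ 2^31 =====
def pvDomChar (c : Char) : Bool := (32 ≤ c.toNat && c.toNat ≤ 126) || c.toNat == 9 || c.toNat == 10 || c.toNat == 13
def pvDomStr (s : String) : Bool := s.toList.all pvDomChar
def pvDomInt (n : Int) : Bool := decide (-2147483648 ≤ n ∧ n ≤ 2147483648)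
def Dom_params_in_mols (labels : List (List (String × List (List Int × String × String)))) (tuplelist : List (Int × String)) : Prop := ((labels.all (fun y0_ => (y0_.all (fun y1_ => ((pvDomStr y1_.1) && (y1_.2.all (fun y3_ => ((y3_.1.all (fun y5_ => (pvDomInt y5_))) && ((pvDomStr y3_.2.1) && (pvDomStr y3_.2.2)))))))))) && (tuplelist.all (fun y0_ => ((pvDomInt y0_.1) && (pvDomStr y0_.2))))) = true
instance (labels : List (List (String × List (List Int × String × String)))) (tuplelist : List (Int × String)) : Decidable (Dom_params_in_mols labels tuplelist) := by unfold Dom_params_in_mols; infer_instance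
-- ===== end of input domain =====

-- B replaces A's per-pattern rescans of all molecules by one pass over the molecules
-- with a set intersection per molecule (one traversal instead of one per pattern).

-- ===== PORT A =====
-- helper param_in_mols(labels, smirks) of A, transliterated: per molecule a (out, found)
-- state over the dict's keys and each force's triples; dict argument = PySem.Dict.ofList.
def param_in_mols_A (labels : List (List (String × List (List Int × String × String)))) (smirks : String) : List Bool :=
  labels.foldl (fun out mol =>
    let d := PySem.Dict.ofList mol
    let st := d.keys.foldl (fun (st : List Bool × Bool) force =>
        ((d.get? force).getD []).foldl
          (fun (st : List Bool × Bool) t =>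
            if t.2.2 == smirks && !st.2 then (st.1 ++ [true], true) else st) st)
      (out, false)
    if !st.2 then st.1 ++ [false] else st.1) []

def params_in_mols (labels : List (List (String × List (List Int × String × String)))) (tuplelist : List (Int × String)) : List Bool :=
  -- smirkslist = [tuplelist[i][1] for i in range(len(tuplelist))]
  let smirkslist := (PySem.List.pyRange 0 tuplelist.length 1).map
      (fun i => (PySem.List.pyGetD tuplelist i (0, "")).2)
  smirkslist.foldl (fun acc smirks =>
    if acc.length == 0 then param_in_mols_A labels smirks
    else
      let tmp := param_in_mols_A labels smirks
      (PySem.List.pyRange 0 tmp.length 1).foldl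
        (fun acc idx =>
          if PySem.List.pyGetD tmp idx false then PySem.List.pySetD acc idx true else acc)
        acc) []

-- ===== PORT B =====
def params_in_mols_alt (labels : List (List (String × List (List Int × String × String)))) (tuplelist : List (Int × String)) : List Bool :=
  if tuplelist = [] then []
  else
    let wanted : PySem.Set String := PySem.Set.ofList (tuplelist.map (fun t => t.2))
    labels.foldl (fun result mol =>
      let d := PySem.Dict.ofList mol
      let present : PySem.Set String :=
        PySem.Set.ofList (d.keys.flatMap (fun force => ((d.get? force).getD []).map (fun t => t.2.2)))
      result ++ [!(PySem.Set.inter present wanted).isEmpty]) []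

-- ===== PRECONDITION & SPEC =====
def Spec_params_in_mols (labels : List (List (String × List (List Int × String × String)))) (tuplelist : List (Int × String)) (out : List Bool) : Prop := out = params_in_mols_alt labels tuplelist
instance (labels : List (List (String × List (List Int × String × String)))) (tuplelist : List (Int × String)) (out : List Bool) : Decidable (Spec_params_in_mols labels tuplelist out) := by unfold Spec_params_in_mols; infer_instance

-- ===== CLAIM (what is proved, stated in full; the proofs are below) =====
def Claim_equal_params_in_mols : Prop := ∀ (labels : List (List (String × List (List Int × String × String)))) (tuplelist : List (Int × String)), Dom_params_in_mols labels tuplelist → Spec_params_in_mols labels tuplelist (params_in_mols labels tuplelist)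

-- ===== LEMMAS AND PROOFS =====

-- canonical per-molecule data: the list of SMIRKS strings occurring in a molecule entry
def flatS (mol : List (String × List (List Int × String × String))) : List String :=
  let d := PySem.Dict.ofList mol
  d.keys.flatMap (fun force => ((d.get? force).getD []).map (fun t => t.2.2))

def molHasOne (mol : List (String × List (List Int × String × String))) (smirks : String) : Bool :=
  (flatS mol).any (fun s => s == smirks)

theorem flag_fold_true (smirks : String)
    (ss : List (List Int × String × String)) (out : List Bool) :
    ss.foldl (fun (st : List Bool × Bool) t =>
      if t.2.2 == smirks && !st.2 then (st.1 ++ [true], true) else st) (out, true) = (out, true) := by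
  induction ss with
  | nil => rfl
  | cons t ss ih => simpa using ih

theorem flag_fold (smirks : String)
    (ss : List (List Int × String × String)) (out : List Bool) :
    ss.foldl (fun (st : List Bool × Bool) t =>
      if t.2.2 == smirks && !st.2 then (st.1 ++ [true], true) else st) (out, false)
    = (out ++ (if ss.any (fun t => t.2.2 == smirks) then [true] else []),
       ss.any (fun t => t.2.2 == smirks)) := by
  induction ss with
  | nil => simp
  | cons t ss ih =>
    rw [List.foldl_cons]
    by_cases h : t.2.2 == smirks
    · rw [if_pos (by simp [h]), flag_fold_true]
      simp [h]
    · rw [if_neg (by simp [h]), ih]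
      rw [Bool.not_eq_true] at h
      simp only [List.any_cons, h, Bool.false_or]

theorem nested_eq_flat {α β γ : Type} (L : List α) (g : α → List β) (f : γ → β → γ) (st : γ) :
    L.foldl (fun st a => (g a).foldl f st) st = (L.flatMap g).foldl f st := by
  induction L generalizing st with
  | nil => rfl
  | cons a L ih => simp [List.flatMap_cons, List.foldl_append, ih]

theorem molHasOne_eq (mol : List (String × List (List Int × String × String))) (smirks : String) :
    molHasOne mol smirks =
      ((PySem.Dict.ofList mol).keys.flatMap
        (fun force => (((PySem.Dict.ofList mol).get? force).getD []))).any
        (fun t => t.2.2 == smirks) := by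
  simp [molHasOne, flatS, List.any_flatMap, List.any_map, Function.comp_def]

theorem pimA_go (smirks : String) (labels : List (List (String × List (List Int × String × String)))) :
    ∀ (out0 : List Bool),
    labels.foldl (fun out mol =>
      let d := PySem.Dict.ofList mol
      let st := d.keys.foldl (fun (st : List Bool × Bool) force =>
          ((d.get? force).getD []).foldl
            (fun (st : List Bool × Bool) t =>
              if t.2.2 == smirks && !st.2 then (st.1 ++ [true], true) else st) st)
        (out, false)
      if !st.2 then st.1 ++ [false] else st.1) out0
    = out0 ++ labels.map (fun mol => molHasOne mol smirks) := by
  induction labels with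
  | nil => simp
  | cons mol labels ih =>
    intro out0
    rw [List.foldl_cons, ih]
    simp only [nested_eq_flat, flag_fold, molHasOne_eq]
    by_cases h : ((PySem.Dict.ofList mol).keys.flatMap
        (fun force => (((PySem.Dict.ofList mol).get? force).getD []))).any
        (fun t => t.2.2 == smirks)
    · rw [h]
      simp
      simpa using h
    · rw [Bool.not_eq_true] at h
      rw [h]
      simp
      simpa using h

theorem param_in_mols_A_eq (labels : List (List (String × List (List Int × String × String))))
    (smirks : String) :
    param_in_mols_A labels smirks = labels.map (fun mol => molHasOne mol smirks) := by
  unfold param_in_mols_A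
  simpa using pimA_go smirks labels []

theorem cons_shift (tmp' : List Bool) (h : Bool) :
    ∀ (ks : List Nat) (acc : List Bool),
    ks.foldl (fun acc k => if tmp'.getD k false then acc.set (k+1) true else acc) (h :: acc)
    = h :: ks.foldl (fun acc k => if tmp'.getD k false then acc.set k true else acc) acc := by
  intro ks
  induction ks with
  | nil => intro acc; rfl
  | cons k ks ih =>
    intro acc
    rw [List.foldl_cons, List.foldl_cons]
    by_cases hk : tmp'.getD k false
    · rw [if_pos hk, if_pos hk]
      rw [show ((h :: acc).set (k+1) true) = h :: acc.set k true from rfl]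
      exact ih _
    · rw [if_neg hk, if_neg hk]
      exact ih acc

theorem upd_core : ∀ (tmp acc : List Bool), acc.length = tmp.length →
    (List.range tmp.length).foldl
      (fun acc k => if tmp.getD k false then acc.set k true else acc) acc
    = List.zipWith (fun a t => a || t) acc tmp := by
  intro tmp
  induction tmp with
  | nil => intro acc h; simp at h; simp [h]
  | cons t tmp' ih =>
    intro acc h
    cases acc with
    | nil => simp at h
    | cons a acc' =>
      simp only [List.length_cons] at h
      simp only [List.length_cons]
      rw [List.range_succ_eq_map, List.foldl_cons]
      have hstep : (if (t :: tmp').getD 0 false then (a :: acc').set 0 true else (a :: acc'))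
          = (a || t) :: acc' := by
        cases t <;> cases a <;> simp
      rw [hstep, List.foldl_map]
      have : ∀ (acc₀ : List Bool),
          (List.range tmp'.length).foldl
            (fun acc k => if (t :: tmp').getD (Nat.succ k) false then acc.set (Nat.succ k) true else acc) acc₀
          = (List.range tmp'.length).foldl
            (fun acc k => if tmp'.getD k false then acc.set (k+1) true else acc) acc₀ := by
        intro acc₀
        apply PySem.List.foldl_congr_mem
        intro b x _; simp
      rw [this, cons_shift, ih acc' (Nat.succ_injective h)]
      simp

theorem upd_loop (tmp acc : List Bool) (h : acc.length = tmp.length) :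
    (PySem.List.pyRange 0 tmp.length 1).foldl
      (fun acc idx =>
        if PySem.List.pyGetD tmp idx false then PySem.List.pySetD acc idx true else acc) acc
    = List.zipWith (fun a t => a || t) acc tmp := by
  rw [PySem.List.pyRange_one]
  simp only [Int.sub_zero, Int.toNat_natCast, List.foldl_map, Int.zero_add]
  have : ∀ (acc₀ : List Bool),
      (List.range tmp.length).foldl
        (fun acc (k : Nat) =>
          if PySem.List.pyGetD tmp ((k : Int)) false then PySem.List.pySetD acc ((k : Int)) true else acc) acc₀
      = (List.range tmp.length).foldl
        (fun acc k => if tmp.getD k false then acc.set k true else acc) acc₀ := by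
    intro acc₀
    apply PySem.List.foldl_congr_mem
    intro b x _
    rw [PySem.List.pyGetD_natCast, PySem.List.pySetD_natCast]
  rw [this, upd_core tmp acc h]

theorem zip_or_map {α : Type} (l : List α) (g h : α → Bool) :
    List.zipWith (fun a t => a || t) (l.map g) (l.map h)
    = l.map (fun x => g x || h x) := by
  induction l with
  | nil => rfl
  | cons x l ih => simp [ih]

def stepOuter (labels : List (List (String × List (List Int × String × String))))
    (acc : List Bool) (smirks : String) : List Bool :=
  if acc.length == 0 then param_in_mols_A labels smirks
  else
    let tmp := param_in_mols_A labels smirks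
    (PySem.List.pyRange 0 tmp.length 1).foldl
      (fun acc idx =>
        if PySem.List.pyGetD tmp idx false then PySem.List.pySetD acc idx true else acc)
      acc

theorem chain_nil (sl : List String) :
    sl.foldl (stepOuter []) [] = ([] : List Bool) := by
  induction sl with
  | nil => rfl
  | cons s sl ih => simpa [stepOuter, param_in_mols_A] using ih

theorem stepOuter_eq (labels : List (List (String × List (List Int × String × String))))
    (hl : labels ≠ []) (g : List (String × List (List Int × String × String)) → Bool)
    (s : String) :
    stepOuter labels (labels.map g) s
    = labels.map (fun mol => g mol || molHasOne mol s) := by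
  unfold stepOuter
  rw [if_neg (by simpa using hl)]
  simp only [param_in_mols_A_eq]
  rw [upd_loop _ _ (by simp), zip_or_map]

theorem chain (labels : List (List (String × List (List Int × String × String))))
    (hl : labels ≠ []) :
    ∀ (sl : List String) (g : List (String × List (List Int × String × String)) → Bool),
    sl.foldl (stepOuter labels) (labels.map g)
    = labels.map (fun mol => g mol || sl.any (fun s => molHasOne mol s)) := by
  intro sl
  induction sl with
  | nil => intro g; simp
  | cons s sl ih =>
    intro g
    rw [List.foldl_cons, stepOuter_eq labels hl g s, ih (fun mol => g mol || molHasOne mol s)]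
    simp [Bool.or_assoc]

theorem smirkslist_eq (tuplelist : List (Int × String)) :
    (PySem.List.pyRange 0 tuplelist.length 1).map
      (fun i => (PySem.List.pyGetD tuplelist i (0, "")).2)
    = tuplelist.map (fun t => t.2) := by
  have : (PySem.List.pyRange 0 tuplelist.length 1).map
      (fun i => (PySem.List.pyGetD tuplelist i (0, "")).2)
    = ((PySem.List.pyRange 0 tuplelist.length 1).map
        (fun i => PySem.List.pyGetD tuplelist i (0, ""))).map (fun t => t.2) := by
    rw [List.map_map]; rfl
  rw [this]
  congr 1
  exact PySem.List.map_pyGetD_pyRange_zero tuplelist (0, "")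

theorem params_in_mols_canon (labels : List (List (String × List (List Int × String × String))))
    (tuplelist : List (Int × String)) :
    params_in_mols labels tuplelist =
      if tuplelist = [] then []
      else labels.map (fun mol => (tuplelist.map (fun t => t.2)).any (fun s => molHasOne mol s)) := by
  unfold params_in_mols
  rw [smirkslist_eq]
  show (tuplelist.map (fun t => t.2)).foldl (stepOuter labels) [] = _
  cases tuplelist with
  | nil => simp
  | cons t rest =>
    rw [if_neg (by simp)]
    by_cases hl : labels = []
    · subst hl
      simpa using chain_nil ((t :: rest).map (fun t => t.2))
    · simp only [List.map_cons, List.foldl_cons]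
      have h0 : stepOuter labels [] t.2 = labels.map (fun mol => molHasOne mol t.2) := by
        unfold stepOuter
        rw [if_pos (by simp), param_in_mols_A_eq]
      rw [h0, chain labels hl (rest.map (fun t => t.2)) (fun mol => molHasOne mol t.2)]
      simp

theorem b_fold (labels : List (List (String × List (List Int × String × String))))
    (b : List (String × List (List Int × String × String)) → Bool) :
    ∀ (out0 : List Bool),
    labels.foldl (fun result mol => result ++ [b mol]) out0 = out0 ++ labels.map b := by
  induction labels with
  | nil => simp
  | cons mol labels ih => intro out0; simp [ih]

theorem mol_bool_eq (mol : List (String × List (List Int × String × String)))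
    (sl : List String) :
    (!(PySem.Set.inter (PySem.Set.ofList (flatS mol)) (PySem.Set.ofList sl)).isEmpty)
    = sl.any (fun s => molHasOne mol s) := by
  rw [Bool.eq_iff_iff]
  rw [Bool.not_eq_true', List.isEmpty_eq_false_iff_exists_mem]
  constructor
  · rintro ⟨x, hx⟩
    rw [PySem.Set.mem_inter, PySem.Set.mem_ofList, PySem.Set.mem_ofList] at hx
    rw [List.any_eq_true]
    exact ⟨x, hx.2, by rw [molHasOne, List.any_eq_true]; exact ⟨x, hx.1, by simp⟩⟩
  · intro h
    rw [List.any_eq_true] at h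
    obtain ⟨s, hs, hmol⟩ := h
    rw [molHasOne, List.any_eq_true] at hmol
    obtain ⟨x, hx, hxs⟩ := hmol
    refine ⟨x, ?_⟩
    rw [PySem.Set.mem_inter, PySem.Set.mem_ofList, PySem.Set.mem_ofList]
    have hxe : x = s := by simpa using hxs
    exact ⟨hx, hxe ▸ hs⟩

theorem params_in_mols_alt_canon (labels : List (List (String × List (List Int × String × String))))
    (tuplelist : List (Int × String)) :
    params_in_mols_alt labels tuplelist =
      if tuplelist = [] then []
      else labels.map (fun mol => (tuplelist.map (fun t => t.2)).any (fun s => molHasOne mol s)) := by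
  unfold params_in_mols_alt
  by_cases h : tuplelist = []
  · simp [h]
  · rw [if_neg h, if_neg h]
    simp only []
    have := b_fold labels
      (fun mol => !(PySem.Set.inter (PySem.Set.ofList (flatS mol))
          (PySem.Set.ofList (tuplelist.map (fun t => t.2)))).isEmpty) []
    rw [show (fun (result : List Bool) mol =>
        result ++ [!(PySem.Set.inter
          (PySem.Set.ofList ((PySem.Dict.ofList mol).keys.flatMap
            (fun force => (((PySem.Dict.ofList mol).get? force).getD []).map (fun t => t.2.2))))
          (PySem.Set.ofList (tuplelist.map (fun t => t.2)))).isEmpty])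
      = (fun (result : List Bool) mol =>
        result ++ [!(PySem.Set.inter (PySem.Set.ofList (flatS mol))
          (PySem.Set.ofList (tuplelist.map (fun t => t.2)))).isEmpty]) from rfl]
    rw [this]
    simp only [List.nil_append]
    congr 1
    funext mol
    exact mol_bool_eq mol (tuplelist.map (fun t => t.2))

-- ===== VERDICT (by name: the statement is the Claim_ definition above) =====
theorem params_in_mols_spec : Claim_equal_params_in_mols := by
  intro labels tuplelist _
  unfold Spec_params_in_mols
  rw [params_in_mols_canon, params_in_mols_alt_canon]
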